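-- pv_equiv track=rewrite | github.com/hotelcurtains/CS115-Public | hw/hw6.py | constrainedRunLength
-- ===== SOURCE A (Python) =====
-- COMPRESSED_BLOCK_SIZE = 5
--
-- MAX_RUN_LENGTH = 2 ** COMPRESSED_BLOCK_SIZE - 1
--
-- def numToBinary(n):
--     '''returns the binary representation of integer n as a string.
--     inverse to binaryToNum.
--     '''
--     if n == 1:
--         return "1"
--     elif n == 0:
--         return ""
--     else:
--         return numToBinary(n//2) + str(n%2)
--
-- def runLength(S):
--     ''' finds how many times the first bit of binary string S repeats. '''
--     if S == "":
--         return 0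
--     if len(S) == 1:
--         return 1
--     elif S[0] == S[1]:
--         return 1 + runLength(S[1:])
--     else:
--         return 1
--
-- def constrainedRunLength(s):
--     """ takes a binary string s and
--     returns the run length of its first bit,
--     using bytes of COMPRESSED_BLOCK_SIZE bits.
--     if runLength(s) is greater than a byte can hold,
--     it will alternate between full and empty bits
--     and end with the remainder to ensure
--     the entire value is represented.
--         """
--     currentRunLength = runLength(s)
--     if currentRunLength > MAX_RUN_LENGTH:
--         return "1"*COMPRESSED_BLOCK_SIZE + "0"*COMPRESSED_BLOCK_SIZE + constrainedRunLength(s[MAX_RUN_LENGTH:])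
--     elif currentRunLength == MAX_RUN_LENGTH:
--         return "1"*COMPRESSED_BLOCK_SIZE
--     elif currentRunLength < MAX_RUN_LENGTH and currentRunLength > 0:
--         remainder = numToBinary(currentRunLength)
--         return "0"*(COMPRESSED_BLOCK_SIZE - len(remainder)) + remainder
--     else:
--         return ""
-- ===== SOURCE B (Python) =====
-- COMPRESSED_BLOCK_SIZE = 5
--
-- MAX_RUN_LENGTH = 2 ** COMPRESSED_BLOCK_SIZE - 1
--
-- def constrainedRunLength(s):
--     """ takes a binary string s and
--     returns the run length of its first bit,
--     using bytes of COMPRESSED_BLOCK_SIZE bits. """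
--     if not s:
--         return ""
--     c = s[0]
--     r = 1
--     while r < len(s) and s[r] == c:
--         r += 1
--     out = []
--     while r > MAX_RUN_LENGTH:
--         out.append("1" * COMPRESSED_BLOCK_SIZE + "0" * COMPRESSED_BLOCK_SIZE)
--         r -= MAX_RUN_LENGTH
--     if r == MAX_RUN_LENGTH:
--         out.append("1" * COMPRESSED_BLOCK_SIZE)
--     elif r > 0:
--         out.append(format(r, "05b"))
--     return "".join(out)
-- ===== Notes on version B (the rewrite author's own statement) =====
-- stated objective: faster
-- what changed: Replaces the O(n^2) recursive runLength (repeated slicing) and recursive block emission with a single linear scan counting the leading run followed by an arithmetic loop on the count emitting blocks, with the remainder zero-padded via str.format.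
import Mathlib
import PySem

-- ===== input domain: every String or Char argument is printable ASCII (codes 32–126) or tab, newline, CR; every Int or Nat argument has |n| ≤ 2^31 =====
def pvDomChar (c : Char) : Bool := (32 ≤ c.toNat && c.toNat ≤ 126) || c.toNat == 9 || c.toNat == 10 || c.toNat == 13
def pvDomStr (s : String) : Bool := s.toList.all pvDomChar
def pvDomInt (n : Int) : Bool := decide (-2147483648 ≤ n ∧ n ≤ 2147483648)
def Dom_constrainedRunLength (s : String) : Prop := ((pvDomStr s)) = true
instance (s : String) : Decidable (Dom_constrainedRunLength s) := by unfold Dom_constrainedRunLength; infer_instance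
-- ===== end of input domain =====

-- B replaces A's O(n^2) recursive run-length (repeated slicing) by one linear scan
-- plus an arithmetic loop on the count; objective: faster (asymptotic).
-- Python strings are modeled as List Char internally; entries convert via toList/String.ofList.

-- ===== PORT A =====

-- numToBinary(n): only ever called with positive n; ported on Nat (values are nonnegative).
def numToBinaryA (n : Nat) : List Char :=
  if n = 1 then ['1']
  else if n = 0 then []
  else numToBinaryA (n / 2) ++ (if n % 2 = 1 then ['1'] else ['0'])  -- str(n%2)
termination_by n
decreasing_by exact Nat.div_lt_self (by omega) (by omega)

-- runLength(S)
def runLengthA : List Char → Nat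
  | [] => 0
  | [_] => 1
  | a :: b :: t => if a = b then 1 + runLengthA (b :: t) else 1

-- termination helper for the main recursion (run length never exceeds the length)
theorem runLengthA_le (l : List Char) : runLengthA l ≤ l.length := by
  induction l with
  | nil => simp [runLengthA]
  | cons a t ih =>
    cases t with
    | nil => simp [runLengthA]
    | cons b t' =>
      simp only [runLengthA, List.length_cons] at ih ⊢
      split <;> omega

-- constrainedRunLength(s); s[MAX_RUN_LENGTH:] = drop 31 (nonnegative index)
def crlACore (l : List Char) : List Char :=
  let currentRunLength := runLengthA l
  if 31 < currentRunLength then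
    List.replicate 5 '1' ++ List.replicate 5 '0' ++ crlACore (l.drop 31)
  else if currentRunLength = 31 then
    List.replicate 5 '1'
  else if currentRunLength < 31 ∧ 0 < currentRunLength then
    let remainder := numToBinaryA currentRunLength
    List.replicate (5 - remainder.length) '0' ++ remainder
  else
    []
termination_by l.length
decreasing_by
  have := runLengthA_le l
  simp only [List.length_drop]
  omega

def constrainedRunLength (s : String) : String := String.ofList (crlACore s.toList)

-- ===== PORT B =====

-- the scanning while-loop: number of leading chars of t equal to c
def countRunB (c : Char) : List Char → Nat
  | [] => 0
  | x :: t => if x = c then 1 + countRunB c t else 0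

-- the emitting while-loop + final if/elif, driven by the count alone;
-- format(r,'05b') ported via Nat.toDigits 2 padded to width 5
def emitBlocksB (r : Nat) : List Char :=
  if 31 < r then
    List.replicate 5 '1' ++ List.replicate 5 '0' ++ emitBlocksB (r - 31)
  else if r = 31 then
    List.replicate 5 '1'
  else if 0 < r then
    let b := Nat.toDigits 2 r
    List.replicate (5 - b.length) '0' ++ b
  else
    []
termination_by r

def constrainedRunLength_alt (s : String) : String :=
  match s.toList with
  | [] => ""
  | c :: t => String.ofList (emitBlocksB (1 + countRunB c t))

-- ===== PRECONDITION & SPEC =====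
def Spec_constrainedRunLength (s : String) (out : String) : Prop := out = constrainedRunLength_alt s
instance (s : String) (out : String) : Decidable (Spec_constrainedRunLength s out) := by unfold Spec_constrainedRunLength; infer_instance

-- ===== CLAIM (what is proved, stated in full; the proofs are below) =====
def Claim_equal_constrainedRunLength : Prop := ∀ (s : String), Dom_constrainedRunLength s → Spec_constrainedRunLength s (constrainedRunLength s)

-- ===== LEMMAS AND PROOFS =====

theorem runLengthA_cons (c : Char) (t : List Char) :
    runLengthA (c :: t) = 1 + countRunB c t := by
  induction t generalizing c with
  | nil => simp [runLengthA, countRunB]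
  | cons b t' ih =>
    simp only [runLengthA, countRunB]
    by_cases h : c = b
    · subst h
      simp [ih]
    · have h' : b ≠ c := fun e => h e.symm
      simp [h, h']

theorem runLengthA_drop (k : Nat) (l : List Char) (h : k < runLengthA l) :
    runLengthA (l.drop k) = runLengthA l - k := by
  induction k generalizing l with
  | zero => simp
  | succ k ih =>
    cases l with
    | nil => simp [runLengthA] at h
    | cons a t =>
      cases t with
      | nil => simp [runLengthA] at h
      | cons b t' =>
        simp only [runLengthA] at h ⊢
        by_cases hab : a = b
        · simp only [if_pos hab] at h ⊢
          have := ih (b :: t') (by omega)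
          simp only [List.drop_succ_cons]
          omega
        · simp [if_neg hab] at h

theorem pad_eq (r : Nat) (h1 : r < 31) (h2 : 0 < r) :
    List.replicate (5 - (numToBinaryA r).length) '0' ++ numToBinaryA r
      = List.replicate (5 - (Nat.toDigits 2 r).length) '0' ++ Nat.toDigits 2 r := by
  interval_cases r <;> simp [numToBinaryA, Nat.toDigits, Nat.toDigitsCore, Nat.digitChar]

theorem crlACore_eq (l : List Char) : crlACore l = emitBlocksB (runLengthA l) := by
  induction hn : l.length using Nat.strong_induction_on generalizing l with
  | _ n ih =>
    subst hn
    rw [crlACore, emitBlocksB]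
    by_cases h31 : 31 < runLengthA l
    · have hle := runLengthA_le l
      have hdrop := runLengthA_drop 31 l (by omega)
      have hlen : (l.drop 31).length < l.length := by
        simp only [List.length_drop]; omega
      simp only [if_pos h31]
      rw [ih _ hlen _ rfl, hdrop]
    · simp only [if_neg h31]
      by_cases he : runLengthA l = 31
      · simp [he]
      · simp only [if_neg he]
        by_cases hp : 0 < runLengthA l
        · have hlt : runLengthA l < 31 := by omega
          simp only [if_pos (And.intro hlt hp), if_pos hp]
          exact pad_eq _ hlt hp
        · have : ¬ (runLengthA l < 31 ∧ 0 < runLengthA l) := by omega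
          simp [hp]

-- ===== VERDICT (by name: the statement is the Claim_ definition above) =====
theorem constrainedRunLength_spec : Claim_equal_constrainedRunLength := by
  intro s _
  unfold Spec_constrainedRunLength constrainedRunLength constrainedRunLength_alt
  rw [crlACore_eq]
  cases h : s.toList with
  | nil => rw [runLengthA]; rw [emitBlocksB]; rfl
  | cons c t => rw [runLengthA_cons]
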